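-- pv_equiv track=rewrite | github.com/ydb-platform/ydb | .github/scripts/tests/mute_logic.py | _matches_error_filter
-- ===== SOURCE A (Python) =====
-- def _matches_error_filter(error_type, error_filter):
--     """Check if error_type matches error_filter."""
--     if not error_filter:
--         return True
--     err = (error_type or '').upper()
--     includes = [str(x).strip().upper() for x in error_filter if not str(x).strip().startswith('!')]
--     excludes = [str(x).strip().upper()[1:] for x in error_filter if str(x).strip().upper().startswith('!')]
--     if excludes and any(ex and ex in err for ex in excludes):
--         return False
--     if includes and not any(inc and inc in err for inc in includes):
--         return False
--     return True
-- ===== SOURCE B (Python) =====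
-- def _matches_error_filter(error_type, error_filter):
--     """Check if error_type matches error_filter."""
--     if not error_filter:
--         return True
--     err = (error_type or '').upper()
--     # Three-state automaton over the entries, with early termination:
--     # state 0 = no include pattern seen, 1 = include(s) seen but none matched,
--     # 2 = an include already matched (remaining include patterns are skipped).
--     state = 0
--     for x in error_filter:
--         s = str(x).strip()
--         if s.startswith('!'):
--             tok = s[1:].upper()
--             if tok and tok in err:
--                 return False  # an exclude hit ends the scan immediately
--         elif state != 2:
--             tok = s.upper()
--             state = 2 if (tok and tok in err) else 1
--     return state != 1
-- ===== Notes on version B (the rewrite author's own statement) =====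
-- stated objective: alternative
-- what changed: Replaces A's staged comprehensions (two partition+map passes plus two any() scans over intermediate lists) with a three-state automaton that scans the filter once, returns False the moment an exclude pattern matches, and stops testing include patterns after the first include match; the verdict falls out of the final state.
import Mathlib
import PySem

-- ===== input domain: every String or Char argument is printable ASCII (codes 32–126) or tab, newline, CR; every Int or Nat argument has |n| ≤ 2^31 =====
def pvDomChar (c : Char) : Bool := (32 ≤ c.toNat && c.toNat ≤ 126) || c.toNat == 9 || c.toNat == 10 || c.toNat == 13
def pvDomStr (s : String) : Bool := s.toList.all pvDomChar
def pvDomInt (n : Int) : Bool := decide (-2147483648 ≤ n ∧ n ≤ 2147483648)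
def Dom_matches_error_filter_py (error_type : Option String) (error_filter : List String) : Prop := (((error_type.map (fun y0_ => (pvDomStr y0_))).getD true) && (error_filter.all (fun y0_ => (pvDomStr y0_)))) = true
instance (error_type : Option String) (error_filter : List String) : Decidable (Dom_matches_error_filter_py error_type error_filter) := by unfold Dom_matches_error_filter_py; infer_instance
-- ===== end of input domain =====

-- B replaces A's staged comprehensions and any() scans with a single-scan
-- three-state automaton that exits early on an exclude hit and skips include
-- tests after a match (constant-factor speedup measured).

-- ===== PORT A =====
def matches_error_filter_py (error_type : Option String) (error_filter : List String) : Bool :=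
  if error_filter.isEmpty then true
  else
    let err := PySem.Str.upper (error_type.getD "")
    let includes := (error_filter.filter
        (fun x => !(PySem.Str.startswith (PySem.Str.strip x) "!"))).map
        (fun x => PySem.Str.upper (PySem.Str.strip x))
    let excludes := (error_filter.filter
        (fun x => PySem.Str.startswith (PySem.Str.upper (PySem.Str.strip x)) "!")).map
        (fun x => PySem.Str.slice (PySem.Str.upper (PySem.Str.strip x)) (some 1) none)
    if !excludes.isEmpty && excludes.any (fun ex => ex != "" && PySem.Str.isIn ex err) then false
    else if !includes.isEmpty && !(includes.any (fun inc => inc != "" && PySem.Str.isIn inc err)) then false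
    else true

-- ===== PORT B =====
-- recursive scanner; state : 0 = no include seen, 1 = include seen unmatched, 2 = include matched
def pvScan (err : String) (fs : List String) (state : Int) : Bool :=
  match fs with
  | [] => state != 1
  | x :: rest =>
    let s := PySem.Str.strip x
    if PySem.Str.startswith s "!" then
      let tok := PySem.Str.upper (PySem.Str.slice s (some 1) none)
      if tok != "" && PySem.Str.isIn tok err then false
      else pvScan err rest state
    else if state == 2 then pvScan err rest 2
    else
      let tok := PySem.Str.upper s
      pvScan err rest (if tok != "" && PySem.Str.isIn tok err then 2 else 1)

def matches_error_filter_py_alt (error_type : Option String) (error_filter : List String) : Bool :=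
  if error_filter.isEmpty then true
  else pvScan (PySem.Str.upper (error_type.getD "")) error_filter 0

-- ===== PRECONDITION & SPEC =====
def Spec_matches_error_filter_py (error_type : Option String) (error_filter : List String) (out : Bool) : Prop := out = matches_error_filter_py_alt error_type error_filter
instance (error_type : Option String) (error_filter : List String) (out : Bool) : Decidable (Spec_matches_error_filter_py error_type error_filter out) := by unfold Spec_matches_error_filter_py; infer_instance

-- ===== CLAIM (what is proved, stated in full; the proofs are below) =====
def Claim_equal_matches_error_filter_py : Prop := ∀ (error_type : Option String) (error_filter : List String), Dom_matches_error_filter_py error_type error_filter → Spec_matches_error_filter_py error_type error_filter (matches_error_filter_py error_type error_filter)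

-- ===== LEMMAS AND PROOFS =====

-- the three per-entry facts the scan is about
def pvExcl (err x : String) : Bool :=
  PySem.Str.startswith (PySem.Str.strip x) "!" &&
  (PySem.Str.upper (PySem.Str.slice (PySem.Str.strip x) (some 1) none) != "" &&
   PySem.Str.isIn (PySem.Str.upper (PySem.Str.slice (PySem.Str.strip x) (some 1) none)) err)
def pvInc (x : String) : Bool := !PySem.Str.startswith (PySem.Str.strip x) "!"
def pvIncHit (err x : String) : Bool :=
  pvInc x && (PySem.Str.upper (PySem.Str.strip x) != "" &&
    PySem.Str.isIn (PySem.Str.upper (PySem.Str.strip x)) err)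

-- uppercasing a character yields '!' only on '!' itself
theorem pvUpperChar_bang (c : Char) : (PySem.Chars.upperChar c = '!') ↔ c = '!' := by
  unfold PySem.Chars.upperChar
  split_ifs with h
  · constructor
    · intro heq
      exfalso
      have h1 : 97 ≤ c.toNat ∧ c.toNat ≤ 122 := by
        unfold PySem.Chars.islower at h
        simp only [Bool.and_eq_true, decide_eq_true_eq, Char.le_def,
          UInt32.le_iff_toNat_le] at h
        exact ⟨h.1, h.2⟩
      have h2 : (Char.ofNat (c.toNat - 32)).toNat = 33 := by rw [heq]; decide
      rw [Char.toNat_ofNat, if_pos (Or.inl (by omega))] at h2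
      omega
    · intro hc
      subst hc
      exact absurd h (by decide)
  · simp

-- 'startswith "!"' is unaffected by upper()
theorem pvStartswith_upper_bang (s : String) :
    PySem.Str.startswith (PySem.Str.upper s) "!" = PySem.Str.startswith s "!" := by
  simp only [PySem.Str.startswith_eq, PySem.Str.toList_upper]
  rcases hs : s.toList with _ | ⟨c, cs⟩
  · simp [PySem.Chars.upper]
  · have hb : "!".toList = ['!'] := rfl
    apply Bool.eq_iff_iff.mpr
    simp only [PySem.Chars.startswith_iff, PySem.Chars.upper, List.map_cons, hb,
      List.cons_prefix_cons, List.nil_prefix, and_true]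
    exact ⟨fun h => ((pvUpperChar_bang c).mp h.symm).symm,
           fun h => ((pvUpperChar_bang c).mpr h.symm).symm⟩

-- s.upper()[1:] = s[1:].upper()
theorem pvSlice1_upper (s : String) :
    PySem.Str.slice (PySem.Str.upper s) (some 1) none = PySem.Str.upper (PySem.Str.slice s (some 1) none) := by
  apply String.toList_inj.mp
  simp only [PySem.Str.toList_slice, PySem.Str.toList_upper, PySem.Chars.slice_eq_listSlice,
    PySem.Chars.upper]
  rw [PySem.List.slice_from _ (by norm_num : (0:Int) ≤ 1),
      PySem.List.slice_from _ (by norm_num : (0:Int) ≤ 1), List.map_drop]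

-- a filtered list is empty iff no element satisfies the predicate
theorem pvIsEmpty_filter {α : Type} (p : α → Bool) (l : List α) :
    (l.filter p).isEmpty = !l.any p := by
  induction l with
  | nil => rfl
  | cons x xs ih =>
    by_cases h : p x = true <;> simp [h, ih]

-- a conjunct implied by the other is absorbed: any p && any (p && r) = any (p && r)
theorem pvAny_and_absorb {α : Type} (p r : α → Bool) (l : List α) :
    (l.any p && l.any (fun a => p a && r a)) = l.any (fun a => p a && r a) := by
  cases hq : l.any (fun a => p a && r a) with
  | false => simp
  | true =>
    simp only [Bool.and_true]
    rcases List.any_eq_true.mp hq with ⟨a, ha, hpa⟩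
    exact List.any_eq_true.mpr ⟨a, ha, by revert hpa; cases p a <;> simp⟩

-- characterisations of the scanner at each state value
theorem pvScan_two (err : String) (fs : List String) :
    pvScan err fs 2 = !fs.any (pvExcl err) := by
  induction fs with
  | nil => rfl
  | cons x rest ih =>
    have hx : pvExcl err x = (PySem.Str.startswith (PySem.Str.strip x) "!" &&
        (PySem.Str.upper (PySem.Str.slice (PySem.Str.strip x) (some 1) none) != "" &&
         PySem.Str.isIn (PySem.Str.upper (PySem.Str.slice (PySem.Str.strip x) (some 1) none)) err)) := rfl
    simp only [pvScan, List.any_cons, hx]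
    by_cases hs : PySem.Str.startswith (PySem.Str.strip x) "!" = true
    · rw [if_pos hs, hs]
      by_cases ht : (PySem.Str.upper (PySem.Str.slice (PySem.Str.strip x) (some 1) none) != "" &&
          PySem.Str.isIn (PySem.Str.upper (PySem.Str.slice (PySem.Str.strip x) (some 1) none)) err) = true
      · rw [if_pos ht, ht]; simp
      · rw [if_neg ht, Bool.eq_false_iff.mpr ht, ih]; simp
    · rw [if_neg hs, Bool.eq_false_iff.mpr hs,
        if_pos (by decide : (((2:Int) == 2) = true)), ih]
      simp

theorem pvScan_one (err : String) (fs : List String) :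
    pvScan err fs 1 = (!fs.any (pvExcl err) && fs.any (pvIncHit err)) := by
  induction fs with
  | nil => rfl
  | cons x rest ih =>
    have hx : pvExcl err x = (PySem.Str.startswith (PySem.Str.strip x) "!" &&
        (PySem.Str.upper (PySem.Str.slice (PySem.Str.strip x) (some 1) none) != "" &&
         PySem.Str.isIn (PySem.Str.upper (PySem.Str.slice (PySem.Str.strip x) (some 1) none)) err)) := rfl
    have hy : pvIncHit err x = (!PySem.Str.startswith (PySem.Str.strip x) "!" &&
        (PySem.Str.upper (PySem.Str.strip x) != "" &&
         PySem.Str.isIn (PySem.Str.upper (PySem.Str.strip x)) err)) := rfl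
    simp only [pvScan, List.any_cons, hx, hy]
    by_cases hs : PySem.Str.startswith (PySem.Str.strip x) "!" = true
    · rw [if_pos hs, hs]
      by_cases ht : (PySem.Str.upper (PySem.Str.slice (PySem.Str.strip x) (some 1) none) != "" &&
          PySem.Str.isIn (PySem.Str.upper (PySem.Str.slice (PySem.Str.strip x) (some 1) none)) err) = true
      · rw [if_pos ht, ht]; simp
      · rw [if_neg ht, Bool.eq_false_iff.mpr ht, ih]; simp
    · rw [if_neg hs, Bool.eq_false_iff.mpr hs,
        if_neg (by decide : ¬(((1:Int) == 2) = true))]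
      by_cases ht : (PySem.Str.upper (PySem.Str.strip x) != "" &&
          PySem.Str.isIn (PySem.Str.upper (PySem.Str.strip x)) err) = true
      · rw [if_pos ht, ht, pvScan_two]; simp
      · rw [if_neg ht, Bool.eq_false_iff.mpr ht, ih]; simp

theorem pvScan_zero (err : String) (fs : List String) :
    pvScan err fs 0 = (!fs.any (pvExcl err) && (!fs.any pvInc || fs.any (pvIncHit err))) := by
  induction fs with
  | nil => rfl
  | cons x rest ih =>
    have hx : pvExcl err x = (PySem.Str.startswith (PySem.Str.strip x) "!" &&
        (PySem.Str.upper (PySem.Str.slice (PySem.Str.strip x) (some 1) none) != "" &&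
         PySem.Str.isIn (PySem.Str.upper (PySem.Str.slice (PySem.Str.strip x) (some 1) none)) err)) := rfl
    have hy : pvIncHit err x = (!PySem.Str.startswith (PySem.Str.strip x) "!" &&
        (PySem.Str.upper (PySem.Str.strip x) != "" &&
         PySem.Str.isIn (PySem.Str.upper (PySem.Str.strip x)) err)) := rfl
    have hz : pvInc x = !PySem.Str.startswith (PySem.Str.strip x) "!" := rfl
    simp only [pvScan, List.any_cons, hx, hy, hz]
    by_cases hs : PySem.Str.startswith (PySem.Str.strip x) "!" = true
    · rw [if_pos hs, hs]
      by_cases ht : (PySem.Str.upper (PySem.Str.slice (PySem.Str.strip x) (some 1) none) != "" &&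
          PySem.Str.isIn (PySem.Str.upper (PySem.Str.slice (PySem.Str.strip x) (some 1) none)) err) = true
      · rw [if_pos ht, ht]; simp
      · rw [if_neg ht, Bool.eq_false_iff.mpr ht, ih]; simp
    · rw [if_neg hs, Bool.eq_false_iff.mpr hs,
        if_neg (by decide : ¬(((0:Int) == 2) = true))]
      by_cases ht : (PySem.Str.upper (PySem.Str.strip x) != "" &&
          PySem.Str.isIn (PySem.Str.upper (PySem.Str.strip x)) err) = true
      · rw [if_pos ht, ht, pvScan_two]; simp
      · rw [if_neg ht, Bool.eq_false_iff.mpr ht, pvScan_one]; simp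

-- ===== VERDICT (by name: the statement is the Claim_ definition above) =====
theorem matches_error_filter_py_spec : Claim_equal_matches_error_filter_py := by
  intro error_type error_filter _
  unfold Spec_matches_error_filter_py matches_error_filter_py matches_error_filter_py_alt
  by_cases hE : error_filter.isEmpty = true
  · simp [hE]
  · simp only [hE]
    rw [pvScan_zero]
    simp only [List.any_map, List.any_filter, Function.comp,
      pvStartswith_upper_bang, pvSlice1_upper, List.isEmpty_map, pvIsEmpty_filter,
      Bool.not_not]
    rw [pvAny_and_absorb]
    have h1 : (fun a => PySem.Str.startswith (PySem.Str.strip a) "!" &&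
        (PySem.Str.upper (PySem.Str.slice (PySem.Str.strip a) (some 1) none) != "" &&
         PySem.Str.isIn (PySem.Str.upper (PySem.Str.slice (PySem.Str.strip a) (some 1) none))
           (PySem.Str.upper (error_type.getD "")))) = pvExcl (PySem.Str.upper (error_type.getD "")) := rfl
    have h2 : (fun a => !PySem.Str.startswith (PySem.Str.strip a) "!" &&
        (PySem.Str.upper (PySem.Str.strip a) != "" &&
         PySem.Str.isIn (PySem.Str.upper (PySem.Str.strip a))
           (PySem.Str.upper (error_type.getD "")))) = pvIncHit (PySem.Str.upper (error_type.getD "")) := rfl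
    have h3 : (fun x => !PySem.Str.startswith (PySem.Str.strip x) "!") = pvInc := rfl
    rw [h1, h2, h3]
    cases hx : error_filter.any (pvExcl (PySem.Str.upper (error_type.getD ""))) <;>
      cases hi : error_filter.any pvInc <;>
        cases hh : error_filter.any (pvIncHit (PySem.Str.upper (error_type.getD ""))) <;>
          simp [*]
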